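-- pv_equiv track=rewrite | github.com/karthickmj/yahoo_api | yahoo_api/statistics.py | delister
-- ===== SOURCE A (Python) =====
-- def delister(List):
--     dictionary = {}
--     for n, item in enumerate(List):
--         if n % 2 ==0:
--             index = item
--         else:
--             value = item
--         if n % 2 == 0:
--             pass
--         else:
--             dictionary[index] = value
--     return dictionary
-- ===== SOURCE B (Python) =====
-- def delister(List):
--     it = iter(List)
--     return dict(zip(it, it))
-- ===== Notes on version B (the rewrite author's own statement) =====
-- stated objective: idiomatic
-- what changed: Replaces the enumerate loop with its parity test and carried index/value variables by pairing the elements directly (zip of one iterator with itself) and handing the pair list to the dict constructor; the per-element Python bytecode loop disappears into C-level zip/dict.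
import Mathlib
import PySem

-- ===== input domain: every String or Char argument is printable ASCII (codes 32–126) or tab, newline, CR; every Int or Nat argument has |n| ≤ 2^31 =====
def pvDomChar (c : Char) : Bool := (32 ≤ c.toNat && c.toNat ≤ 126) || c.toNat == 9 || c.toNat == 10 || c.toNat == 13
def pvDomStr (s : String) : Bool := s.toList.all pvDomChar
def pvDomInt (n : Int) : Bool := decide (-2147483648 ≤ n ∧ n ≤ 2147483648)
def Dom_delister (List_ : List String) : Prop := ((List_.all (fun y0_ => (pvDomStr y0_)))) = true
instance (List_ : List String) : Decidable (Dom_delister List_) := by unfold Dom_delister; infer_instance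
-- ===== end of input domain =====

-- B builds the pair list directly (zip of an iterator with itself) instead of A's parity-tracking
-- enumerate loop; objective: idiomatic. Return value only; neither program mutates its argument.

-- ===== PORT A =====
-- loop state: the dictionary and the last 'index' variable assigned at an even position
-- (none = not yet assigned; at an odd position it is always some, matching Python's NameError-free flow)
def delisterGo (xs : List String) (n : Nat) (d : PySem.Dict String String)
    (index : Option String) : PySem.Dict String String :=
  match xs with
  | [] => d
  | item :: rest =>
    if n % 2 == 0 then
      delisterGo rest (n + 1) d (some item)
    else
      delisterGo rest (n + 1) (d.insert (index.getD "") item) index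

def delister (List_ : List String) : List (String × String) :=
  (delisterGo List_ 0 PySem.Dict.empty none).items

-- ===== PORT B =====
-- zip(it, it) on a single iterator: consume two elements at a time
def pyPairs : List String → List (String × String)
  | a :: b :: rest => (a, b) :: pyPairs rest
  | _ => []

def delister_alt (List_ : List String) : List (String × String) :=
  (PySem.Dict.ofList (pyPairs List_)).items

-- ===== PRECONDITION & SPEC =====
def Spec_delister (List_ : List String) (out : List (String × String)) : Prop := out = delister_alt List_
instance (List_ : List String) (out : List (String × String)) : Decidable (Spec_delister List_ out) := by unfold Spec_delister; infer_instance

-- ===== CLAIM (what is proved, stated in full; the proofs are below) =====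
def Claim_equal_delister : Prop := ∀ (List_ : List String), Dom_delister List_ → Spec_delister List_ (delister List_)

-- ===== LEMMAS AND PROOFS =====
lemma delisterGo_eq_update (xs : List String) :
    ∀ (n : Nat) (d : PySem.Dict String String) (index : Option String), n % 2 = 0 →
      delisterGo xs n d index = d.update (pyPairs xs) := by
  induction xs using pyPairs.induct with
  | case1 a b rest ih =>
    intro n d index hn
    have h1 : (n + 1) % 2 = 1 := by omega
    simp only [delisterGo, pyPairs, hn, h1]
    simp only [PySem.Dict.update, List.foldl]
    exact ih (n + 2) (d.insert a b) (some a) (by omega)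
  | case2 xs h =>
    intro n d index hn
    rcases xs with _ | ⟨a, _ | ⟨b, r⟩⟩
    · simp [delisterGo, pyPairs, PySem.Dict.update]
    · simp [delisterGo, pyPairs, hn, PySem.Dict.update]
    · exact absurd rfl (h a b r)

-- ===== VERDICT (by name: the statement is the Claim_ definition above) =====
theorem delister_spec : Claim_equal_delister := by
  intro L _
  unfold Spec_delister delister delister_alt PySem.Dict.ofList
  rw [delisterGo_eq_update L 0 PySem.Dict.empty none rfl]
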